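-- pv_equiv track=rewrite | github.com/TeleTobyAU/Bachelor | python/SuffixArrayGenerator.py | genCTable
-- ===== SOURCE A (Python) =====
-- def findAlphabet(n):
--     alphabet = []
--     for i in n:
--         if i not in alphabet: alphabet.append(i)
--     alphabet.sort()
--     return alphabet
--
-- def genCTable (n, alphabet):
--     #Define alphabet if none given
--     if alphabet == None:
--         alphabet = findAlphabet(n)
--
--     output = []
--     for i in alphabet:
--         output.append(0)
--         for j in n:
--             if i > j: output[alphabet.index(i)] += 1
--
--     return output
-- ===== SOURCE B (Python) =====
-- def genCTable(n, alphabet):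
--     if alphabet is None:
--         alphabet = sorted(set(n))
--     counts = {}
--     for ch in n:
--         counts[ch] = counts.get(ch, 0) + 1
--     output = [0] * len(alphabet)
--     for s in alphabet:
--         output[alphabet.index(s)] += sum(v for c, v in counts.items() if c < s)
--     return output
-- ===== Notes on version B (the rewrite author's own statement) =====
-- stated objective: faster
-- what changed: B counts character frequencies of n once into a dict and adds, per alphabet symbol, the sum of counts of smaller characters into its slot, instead of A's rescan of all of n with a list.index scan per increment for every alphabet symbol.
import Mathlib
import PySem

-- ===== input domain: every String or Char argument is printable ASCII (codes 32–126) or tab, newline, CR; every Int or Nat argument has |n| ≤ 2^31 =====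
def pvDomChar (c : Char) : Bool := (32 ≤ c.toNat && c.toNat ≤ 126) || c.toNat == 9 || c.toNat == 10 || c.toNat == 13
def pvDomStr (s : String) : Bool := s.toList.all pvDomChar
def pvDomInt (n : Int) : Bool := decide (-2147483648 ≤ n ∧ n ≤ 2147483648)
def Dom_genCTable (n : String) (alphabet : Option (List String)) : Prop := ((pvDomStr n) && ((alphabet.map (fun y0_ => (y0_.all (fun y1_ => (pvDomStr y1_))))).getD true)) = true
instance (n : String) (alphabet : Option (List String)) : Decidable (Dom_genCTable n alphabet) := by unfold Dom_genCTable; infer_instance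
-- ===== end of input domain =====

-- B replaces A's per-symbol rescan of n (plus a list.index scan per increment) by one frequency
-- count of n, adding per alphabet symbol the sum of counts of the distinct characters below it
-- into that symbol's slot (objective: faster by removing the inner scans).
-- Python string '<' is ported as '<' on .toList (same lexicographic code-point order; Lean's own
-- String '<' instance is not kernel-reducible).


-- ===== PORT A =====
def findAlphabet (n : String) : List String :=
  let alphabet : List String := n.toList.foldl
    (fun alphabet c =>
      let i := String.ofList [c]
      if alphabet.contains i then alphabet else alphabet ++ [i]) []
  PySem.List.sorted alphabet (fun x => x.toList) false

def genCTable (n : String) (alphabet : Option (List String)) : List Int :=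
  let al : List String := match alphabet with
    | none => findAlphabet n
    | some a => a
  al.foldl
    (fun output i =>
      let output := output ++ [(0 : Int)]
      n.toList.foldl
        (fun output j =>
          if [j] < i.toList then                -- i > j on Python strings
            match PySem.List.index? al i with   -- alphabet.index(i); i ∈ al, so it never raises
            | some k => output.set k (output.getD k 0 + 1)
            | none => output
          else output) output) []

-- ===== PORT B =====
def genCTable_alt (n : String) (alphabet : Option (List String)) : List Int :=
  let al : List String := match alphabet with
    | none => PySem.List.sorted (PySem.Set.ofList (n.toList.map (fun c => String.ofList [c])))
        (fun x => x.toList) false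
    | some a => a
  let chars : List String := n.toList.map (fun c => String.ofList [c])
  let counts : PySem.Dict String Int := chars.foldl
    (fun d ch => PySem.Dict.insert d ch (PySem.Dict.getD d ch 0 + 1)) PySem.Dict.empty
  al.foldl
    (fun output s =>
      match PySem.List.index? al s with   -- alphabet.index(s); s ∈ al, so it never raises
      | some k => output.set k (output.getD k 0 +
          (((PySem.Dict.items counts).filter (fun q => q.1.toList < s.toList)).map
            (fun q => q.2)).sum)
      | none => output)
    (List.replicate al.length 0)

-- ===== PRECONDITION & SPEC =====
def Spec_genCTable (n : String) (alphabet : Option (List String)) (out : List Int) : Prop := out = genCTable_alt n alphabet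
instance (n : String) (alphabet : Option (List String)) (out : List Int) : Decidable (Spec_genCTable n alphabet out) := by unfold Spec_genCTable; infer_instance

-- ===== CLAIM (what is proved, stated in full; the proofs are below) =====
def Claim_equal_genCTable : Prop := ∀ (n : String) (alphabet : Option (List String)), Dom_genCTable n alphabet → Spec_genCTable n alphabet (genCTable n alphabet)

-- ===== LEMMAS AND PROOFS =====

-- the count, for one symbol x, of characters of n strictly below x
def cntLess (n : String) (x : String) : Int :=
  (n.toList.countP (fun c => [c] < x.toList) : Nat)

-- the accumulation step A's loop reduces to: add cntLess of the symbol into its first occurrence's slot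
def addStep (n : String) (al : List String) (o : List Int) (i : String) : List Int :=
  o.set ((PySem.List.index? al i).getD 0)
    (o.getD ((PySem.List.index? al i).getD 0) 0 + cntLess n i)

-- B's per-symbol sum over the counter equals cntLess
theorem alt_symbol_sum (n : String) (x : String) :
    (((PySem.Dict.items ((n.toList.map (fun c => String.ofList [c])).foldl
        (fun d ch => PySem.Dict.insert d ch (PySem.Dict.getD d ch 0 + 1)) PySem.Dict.empty)).filter
        (fun p => p.1.toList < x.toList)).map (fun p => p.2)).sum = cntLess n x := by
  rw [PySem.Dict.foldl_insert_getD_add_one_eq_counter, PySem.Dict.items_counter,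
    List.filter_map, List.map_map]
  have hperm : ((PySem.Set.ofList (n.toList.map (fun c => String.ofList [c]))).filter
      (fun k => decide (k.toList < x.toList))).Perm
      ((n.toList.map (fun c => String.ofList [c])).dedup.filter (fun k => decide (k.toList < x.toList))) := by
    refine List.Perm.filter _ ?_
    rw [List.perm_ext_iff_of_nodup (PySem.Set.nodup_ofList _) (List.nodup_dedup _)]
    intro a; simp [PySem.Set.mem_ofList]
  have hsum := (hperm.map (fun k => ((n.toList.map (fun c => String.ofList [c])).count k : Int))).sum_eq
  have hcast : (((n.toList.map (fun c => String.ofList [c])).dedup.filter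
        (fun k => decide (k.toList < x.toList))).map
        (fun k => ((n.toList.map (fun c => String.ofList [c])).count k : Int))).sum
      = (((n.toList.map (fun c => String.ofList [c])).countP (fun k => decide (k.toList < x.toList)) : Nat) : Int) := by
    rw [← List.sum_map_count_dedup_filter_eq_countP (fun k : String => decide (k.toList < x.toList)),
      Nat.cast_list_sum (R := Int), List.map_map]
    rfl
  have hpred : ((n.toList.map (fun c => String.ofList [c])).countP (fun k => decide (k.toList < x.toList)))
      = n.toList.countP (fun c => decide ([c] < x.toList)) := by
    rw [List.countP_map]
    simp [Function.comp_def]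
  simp only [Function.comp_def] at hsum hcast ⊢
  rw [hsum, hcast, hpred]
  rfl

-- A's inner loop over the characters of n adds the number of smaller characters to position k
theorem inner_loop (l : List Char) (i : String) (k : Nat) (o : List Int) (hk : k < o.length) :
    l.foldl
      (fun output j => if [j] < i.toList then output.set k (output.getD k 0 + 1) else output) o
      = o.set k (o.getD k 0 + (l.countP (fun c => [c] < i.toList) : Nat)) := by
  induction l generalizing o with
  | nil => simp [List.getD, List.getElem?_eq_getElem hk]
  | cons c l ih =>
    simp only [List.foldl_cons, List.countP_cons]
    by_cases h : [c] < i.toList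
    · rw [if_pos h, ih _ (by simpa using hk), List.set_set]
      have hd : (o.set k (o.getD k 0 + 1)).getD k 0 = o.getD k 0 + 1 := by
        simp [List.getD, List.getElem?_set_self hk]
      rw [hd]
      have hp : (decide ([c] < i.toList)) = true := decide_eq_true h
      simp only [hp, if_true]
      congr 1
      push_cast
      ring
    · rw [if_neg h, ih _ hk]
      simp [h]

-- A's outer loop from any prefix state equals the canonical accumulation over a zero table
theorem bridgeA (n : String) (al : List String) :
    ∀ (rest pre : List String) (o : List Int), al = pre ++ rest → o.length = pre.length →
      rest.foldl
        (fun output i =>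
          let output := output ++ [(0 : Int)]
          n.toList.foldl
            (fun output j =>
              if [j] < i.toList then
                match PySem.List.index? al i with
                | some k => output.set k (output.getD k 0 + 1)
                | none => output
              else output) output) o
      = rest.foldl (addStep n al) (o ++ List.replicate rest.length 0) := by
  intro rest
  induction rest with
  | nil => intro pre o h hlen; simp
  | cons i rest ih =>
    intro pre o h hlen
    have hi : i ∈ al := by rw [h]; exact List.mem_append_right _ (List.mem_cons_self ..)
    obtain ⟨k, hk⟩ := Option.isSome_iff_exists.mp ((PySem.List.index?_isSome_iff al i).mpr hi)
    obtain ⟨hklt, hak, hmin⟩ := PySem.List.getElem_of_index?_eq_some hk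
    have hlen2 : pre.length < al.length := by rw [h]; simp
    have hpre : al[pre.length]'hlen2 = i := by
      subst h; rw [List.getElem_append_right (Nat.le_refl _)]; simp
    have hkle : k ≤ pre.length := by
      by_contra hgt
      exact hmin pre.length (by omega) hpre
    have hbody : (fun (output : List Int) (j : Char) =>
        if [j] < i.toList then
          (match PySem.List.index? al i with
            | some k => output.set k (output.getD k 0 + 1)
            | none => output)
        else output)
        = (fun (output : List Int) (j : Char) =>
            if [j] < i.toList then output.set k (output.getD k 0 + 1) else output) := by
      funext o j; rw [hk]
    have hklt' : k < (o ++ [(0 : Int)]).length := by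
      simp [hlen]; omega
    rw [List.foldl_cons, List.foldl_cons]
    simp only [hbody]
    rw [inner_loop n.toList i k _ hklt']
    have hsplit : o ++ List.replicate (rest.length + 1) (0 : Int)
        = (o ++ [(0 : Int)]) ++ List.replicate rest.length 0 := by
      rw [List.append_assoc]
      congr 1
    have hstep : addStep n al ((o ++ [(0 : Int)]) ++ List.replicate rest.length 0) i
        = ((o ++ [(0 : Int)]).set k ((o ++ [(0 : Int)]).getD k 0 +
            (n.toList.countP (fun c => decide ([c] < i.toList)) : Nat)))
          ++ List.replicate rest.length 0 := by
      rw [addStep, hk]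
      simp only [Option.getD_some]
      have hgd : (o ++ [(0 : Int)] ++ List.replicate rest.length 0).getD k 0
          = (o ++ [(0 : Int)]).getD k 0 := by
        rw [List.getD, List.getD, List.getElem?_append_left hklt']
      rw [hgd, List.set_append_left _ _ hklt']
      rfl
    rw [show o ++ List.replicate (i :: rest).length (0 : Int)
        = (o ++ [0]) ++ List.replicate rest.length 0 from by
      simp only [List.length_cons]; exact hsplit]
    rw [hstep]
    exact ih (pre ++ [i]) _ (by rw [h, List.append_assoc]; rfl) (by simp [hlen])

-- the deduplicating fold of findAlphabet is set(chars)
theorem findAlphabet_base (n : String) :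
    n.toList.foldl
      (fun alphabet c =>
        let i := String.ofList [c]
        if alphabet.contains i then alphabet else alphabet ++ [i]) ([] : List String)
      = PySem.Set.ofList (n.toList.map (fun c => String.ofList [c])) := by
  rw [PySem.Set.ofList_eq_foldl, List.foldl_map]
  rfl

-- A on an explicit alphabet list is the addStep accumulation
theorem a_eq_accum (n : String) (al : List String) :
    genCTable n (some al) = al.foldl (addStep n al) (List.replicate al.length 0) := by
  show al.foldl _ [] = _
  have := bridgeA n al al [] [] rfl rfl
  simpa using this

-- B on an explicit alphabet list is the same accumulation
theorem alt_eq_accum (n : String) (al : List String) :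
    genCTable_alt n (some al) = al.foldl (addStep n al) (List.replicate al.length 0) := by
  show al.foldl _ (List.replicate al.length 0) = _
  refine PySem.List.foldl_congr_mem _ _ _ _ ?_
  intro acc s hs
  obtain ⟨k, hk⟩ := Option.isSome_iff_exists.mp ((PySem.List.index?_isSome_iff al s).mpr hs)
  rw [hk, addStep, hk, alt_symbol_sum]
  rfl

-- ===== VERDICT (by name: the statement is the Claim_ definition above) =====
set_option maxRecDepth 8000 in
theorem genCTable_spec : Claim_equal_genCTable := by
  intro n alphabet _
  show genCTable n alphabet = genCTable_alt n alphabet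
  cases alphabet with
  | some al => rw [a_eq_accum, alt_eq_accum]
  | none =>
    have hal : findAlphabet n
        = PySem.List.sorted (PySem.Set.ofList (n.toList.map (fun c => String.ofList [c])))
            (fun x => x.toList) false := by
      unfold findAlphabet
      rw [findAlphabet_base]
    have hsame : genCTable n none = genCTable n (some (findAlphabet n)) := rfl
    have hsame' : genCTable_alt n none = genCTable_alt n (some (findAlphabet n)) := by
      show _ = genCTable_alt n (some (findAlphabet n))
      rw [genCTable_alt, hal]
      rfl
    rw [hsame, hsame', a_eq_accum, alt_eq_accum]
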